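-- pv_equiv track=rewrite | github.com/Jenn1217/VstarLab | cag/cag_runtime.py | build_citation_block
-- ===== SOURCE A (Python) =====
-- from typing import List, Dict, Any, Tuple
--
-- def build_citation_block(contexts: List[Dict[str, Any]]) -> str:
--     # 只取 source 字段，去重，保持稳定顺序
--     sources = []
--     for c in contexts:
--         s = str(c.get("source", "") or "").strip()
--         if s:
--             sources.append(s)
--     sources = sorted(set(sources))
--
--     block = "【引用来源】\n"
--     if sources:
--         block += "\n".join(f"- {s}" for s in sources)
--     return block
-- ===== SOURCE B (Python) =====
-- def build_citation_block(contexts):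
--     stripped = [str(c.get("source", "") or "").strip() for c in contexts]
--     collected = sorted([s for s in stripped if s])
--     uniq = []
--     for s in collected:
--         if not uniq or uniq[-1] != s:
--             uniq.append(s)
--     block = "【引用来源】\n"
--     if uniq:
--         block += "\n".join("- " + s for s in uniq)
--     return block
-- ===== Notes on version B (the rewrite author's own statement) =====
-- stated objective: alternative
-- what changed: B maps/filters via comprehensions, sorts the full multiset of stripped sources and collapses duplicates by a single adjacency scan, instead of A's set()-dedup followed by sorting the distinct elements.
import Mathlib
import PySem

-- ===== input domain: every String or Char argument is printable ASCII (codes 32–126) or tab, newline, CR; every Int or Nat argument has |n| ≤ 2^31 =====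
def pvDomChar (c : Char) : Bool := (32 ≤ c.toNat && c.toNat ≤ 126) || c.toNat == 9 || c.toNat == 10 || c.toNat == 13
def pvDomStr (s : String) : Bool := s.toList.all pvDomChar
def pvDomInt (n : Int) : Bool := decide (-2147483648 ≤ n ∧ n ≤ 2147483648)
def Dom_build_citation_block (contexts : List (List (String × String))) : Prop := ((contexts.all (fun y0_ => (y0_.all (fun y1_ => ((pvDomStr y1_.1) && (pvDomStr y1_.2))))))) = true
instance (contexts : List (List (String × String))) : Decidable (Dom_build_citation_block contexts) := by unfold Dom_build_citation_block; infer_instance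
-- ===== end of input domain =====

-- B replaces A's set()-dedup-then-sort by map/filter comprehensions, a full sort and a single
-- adjacency scan that collapses duplicates; same output, same O(n log n) cost (objective: alternative).


-- ===== PORT A =====
-- shared source-field extraction used by both ports (the identical expression in both Pythons):
-- s = str(c.get("source", "") or "").strip()  (values are strings, so str() is the identity;
-- 'or ""' maps a falsy (empty) value to "", which strip leaves unchanged — ported literally)
def pvStripSource (c : List (String × String)) : String :=
  PySem.Str.strip (let v := PySem.Dict.getD ⟨c⟩ "source" ""; if v = "" then "" else v)

def build_citation_block (contexts : List (List (String × String))) : String :=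
  let sources := contexts.foldl (fun acc c =>
    if pvStripSource c ≠ "" then acc ++ [pvStripSource c] else acc) []
  let sources := PySem.List.sorted (PySem.Set.ofList sources) (fun x => x) false
  let block := "【引用来源】\n"
  if sources ≠ [] then block ++ PySem.Str.join "\n" (sources.map (fun s => "- " ++ s)) else block

-- ===== PORT B =====
def build_citation_block_alt (contexts : List (List (String × String))) : String :=
  let stripped := contexts.map pvStripSource
  let collected := PySem.List.sorted (stripped.filter (fun s => s ≠ "")) (fun x => x) false
  let uniq := collected.foldl (fun acc s =>
    if acc = [] ∨ acc.getLast? ≠ some s then acc ++ [s] else acc) []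
  let block := "【引用来源】\n"
  if uniq ≠ [] then block ++ PySem.Str.join "\n" (uniq.map (fun s => "- " ++ s)) else block

-- ===== PRECONDITION & SPEC =====
def Spec_build_citation_block (contexts : List (List (String × String))) (out : String) : Prop := out = build_citation_block_alt contexts
instance (contexts : List (List (String × String))) (out : String) : Decidable (Spec_build_citation_block contexts out) := by unfold Spec_build_citation_block; infer_instance

-- ===== CLAIM (what is proved, stated in full; the proofs are below) =====
def Claim_equal_build_citation_block : Prop := ∀ (contexts : List (List (String × String))), Dom_build_citation_block contexts → Spec_build_citation_block contexts (build_citation_block contexts)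

-- ===== LEMMAS AND PROOFS =====

-- structural form of B's adjacency loop, given the last element already emitted
def pvAdjFrom (last : String) : List String → List String
  | [] => []
  | y :: t => if y = last then pvAdjFrom last t else y :: pvAdjFrom y t

theorem pvFoldl_adjFrom (l acc : List String) (x : String) (hne : acc ≠ [])
    (hlast : acc.getLast? = some x) :
    l.foldl (fun acc s => if acc = [] ∨ acc.getLast? ≠ some s then acc ++ [s] else acc) acc
      = acc ++ pvAdjFrom x l := by
  induction l generalizing acc x with
  | nil => simp [pvAdjFrom]
  | cons y t ih =>
    simp only [List.foldl_cons, pvAdjFrom]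
    by_cases h : y = x
    · subst h
      rw [if_neg (by simp [hne, hlast]), if_pos rfl, ih acc y hne hlast]
    · rw [if_pos (Or.inr (by rw [hlast]; exact fun e => h (by injection e; simp_all))), if_neg h]
      rw [ih (acc ++ [y]) y (by simp) (by simp)]
      simp

theorem pvFoldl_adjDedup (l : List String) :
    l.foldl (fun acc s => if acc = [] ∨ acc.getLast? ≠ some s then acc ++ [s] else acc) []
      = match l with | [] => [] | y :: t => y :: pvAdjFrom y t := by
  cases l with
  | nil => rfl
  | cons y t =>
    simp only [List.foldl_cons]
    rw [if_pos (by simp)]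
    exact pvFoldl_adjFrom t [y] y (by simp) (by simp)

theorem pvAdjFrom_mem (y : String) (t : List String) (hp : (y :: t).Pairwise (· ≤ ·)) :
    ∀ z, z ∈ y :: pvAdjFrom y t ↔ z ∈ y :: t := by
  induction t generalizing y with
  | nil => simp [pvAdjFrom]
  | cons w t' ih =>
    intro z
    simp only [pvAdjFrom]
    by_cases h : w = y
    · subst h
      have hp' : (w :: t').Pairwise (· ≤ ·) := by
        rcases List.pairwise_cons.1 hp with ⟨h1, h2⟩; exact h2
      have := ih w hp' z
      simp only [List.mem_cons] at this ⊢
      tauto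
    · rw [if_neg h]
      have hp' : (w :: t').Pairwise (· ≤ ·) := (List.pairwise_cons.1 hp).2
      have := ih w hp' z
      simp only [List.mem_cons] at this ⊢
      tauto

theorem pvAdjFrom_pairwise (y : String) (t : List String) (hp : (y :: t).Pairwise (· ≤ ·)) :
    (y :: pvAdjFrom y t).Pairwise (· < ·) := by
  induction t generalizing y with
  | nil => simp [pvAdjFrom]
  | cons w t' ih =>
    have hyw : y ≤ w := (List.pairwise_cons.1 hp).1 w (List.mem_cons_self ..)
    have hp' : (w :: t').Pairwise (· ≤ ·) := (List.pairwise_cons.1 hp).2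
    simp only [pvAdjFrom]
    by_cases h : w = y
    · subst h
      rw [if_pos rfl]
      exact ih w hp'
    · rw [if_neg h]
      have hlt : y < w := lt_of_le_of_ne hyw (fun e => h e.symm)
      have hrec := ih w hp'
      refine List.pairwise_cons.2 ⟨?_, hrec⟩
      intro z hz
      rcases List.mem_cons.1 hz with rfl | hz'
      · exact hlt
      · exact lt_trans hlt ((List.pairwise_cons.1 hrec).1 z hz')

-- B's dedup of the sorted multiset equals A's sorted set
theorem pvSortedSet_eq_adjDedup (xs : List String) :
    PySem.List.sorted (PySem.Set.ofList xs) (fun x => x) false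
      = (PySem.List.sorted xs (fun x => x) false).foldl
          (fun acc s => if acc = [] ∨ acc.getLast? ≠ some s then acc ++ [s] else acc) [] := by
  rw [pvFoldl_adjDedup]
  have hperm := PySem.List.sorted_perm xs (fun x => x) false
  have hpw := PySem.List.sorted_pairwise xs (fun x => x)
  cases hs : PySem.List.sorted xs (fun x => x) false with
  | nil =>
    have : xs = [] := by
      have := hperm; rw [hs] at this; exact (List.Perm.nil_eq this).symm
    subst this
    simp [PySem.Set.ofList_nil, PySem.List.sorted]
  | cons y t =>
    rw [hs] at hpw hperm
    have hmem := pvAdjFrom_mem y t hpw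
    have hlt := pvAdjFrom_pairwise y t hpw
    apply PySem.List.sorted_eq_of_perm_of_pairwise_lt
    · -- (y :: pvAdjFrom y t).Perm (Set.ofList xs)
      have hnd : (y :: pvAdjFrom y t).Nodup := List.Pairwise.imp (fun h => ne_of_lt h) hlt
      apply (List.perm_ext_iff_of_nodup hnd (PySem.Set.nodup_ofList xs)).2
      intro z
      rw [hmem z, PySem.Set.mem_ofList]
      exact ⟨fun h => hperm.mem_iff.1 h, fun h => hperm.mem_iff.2 h⟩
    · exact hlt

theorem pvSources_eq (contexts : List (List (String × String))) :
    contexts.foldl (fun acc c =>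
      if pvStripSource c ≠ "" then acc ++ [pvStripSource c] else acc) []
      = (contexts.map pvStripSource).filter (fun s => s ≠ "") := by
  have h := PySem.List.foldl_append_if (fun c => decide (pvStripSource c ≠ ""))
    pvStripSource contexts []
  simp only [decide_eq_true_eq] at h
  rw [h, List.filter_map]
  simp only [Function.comp_def, List.nil_append]

-- ===== VERDICT (by name: the statement is the Claim_ definition above) =====
theorem build_citation_block_spec : Claim_equal_build_citation_block := by
  intro contexts _
  unfold Spec_build_citation_block build_citation_block build_citation_block_alt
  simp only
  rw [pvSources_eq, pvSortedSet_eq_adjDedup]
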